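-- pv_equiv track=rewrite | github.com/Tring-Er/AniMov | AniMov/websites/TheFlix.py | parse
-- ===== SOURCE A (Python) =====
-- def parse(text: str) -> str:
--     parsed_text = text[0].lower()
--     for char in text[1:]:
--         if char.isupper() and parsed_text[-1] != " ":
--             parsed_text += f" {char.lower()}"
--         else:
--             parsed_text += char.lower()
--     return parsed_text.replace(" ", "-")
-- ===== SOURCE B (Python) =====
-- def parse(text: str) -> str:
--     words = []
--     cur = []
--     for ch in text:
--         if ch == ' ':
--             words.append(''.join(cur))
--             cur = []
--         elif ch.isupper() and cur:
--             words.append(''.join(cur))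
--             cur = [ch.lower()]
--         else:
--             cur.append(ch.lower())
--     words.append(''.join(cur))
--     return '-'.join(words)
-- ===== Notes on version B (the rewrite author's own statement) =====
-- stated objective: alternative
-- what changed: B collects lowercase word segments in one scan (a space, or an uppercase letter after a non-space, closes the current segment) and hyphen-joins the segments, instead of A's growing one string with inserted spaces plus a final space-to-hyphen replace pass.
import Mathlib
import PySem

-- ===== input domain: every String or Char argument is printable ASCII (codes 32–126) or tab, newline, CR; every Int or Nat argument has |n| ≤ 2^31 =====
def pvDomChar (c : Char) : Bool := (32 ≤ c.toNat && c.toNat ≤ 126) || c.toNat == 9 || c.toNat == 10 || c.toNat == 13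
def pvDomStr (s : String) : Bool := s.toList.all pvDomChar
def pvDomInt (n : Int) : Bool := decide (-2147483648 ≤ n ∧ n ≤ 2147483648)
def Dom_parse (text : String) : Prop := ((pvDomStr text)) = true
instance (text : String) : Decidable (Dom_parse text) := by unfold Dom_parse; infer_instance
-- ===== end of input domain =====

-- B rebuilds the result as '-'-joined word segments in one scan (no final replace pass); same value as A on every
-- non-empty string; on "" A raises IndexError (excluded by Pre_parse) while B returns "".

-- ===== PORT A =====
-- parsed_text += (" " + char.lower()) when char.isupper() and parsed_text[-1] != " ", else += char.lower()
def parseStepA (acc : List Char) (c : Char) : List Char :=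
  if PySem.Chars.isupper c && decide (PySem.List.pyGet? acc (-1) ≠ some ' ') then
    acc ++ [' ', PySem.Chars.lowerChar c]
  else
    acc ++ [PySem.Chars.lowerChar c]

def parse (text : String) : String :=
  match text.toList with
  | [] => ""  -- Python raises IndexError on text[0]; excluded by Pre_parse
  | c :: rest =>
    String.mk (PySem.Chars.replace (rest.foldl parseStepA [PySem.Chars.lowerChar c]) [' '] ['-'])

-- ===== PORT B =====
-- state = (words, cur); space closes a word, an uppercase char with nonempty cur starts a new word
def parseStepB (st : List (List Char) × List Char) (c : Char) : List (List Char) × List Char :=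
  if c == ' ' then (st.1 ++ [st.2], [])
  else if PySem.Chars.isupper c && !st.2.isEmpty then (st.1 ++ [st.2], [PySem.Chars.lowerChar c])
  else (st.1, st.2 ++ [PySem.Chars.lowerChar c])

def parse_alt (text : String) : String :=
  let st := text.toList.foldl parseStepB ([], [])
  String.mk (PySem.Chars.join ['-'] (st.1 ++ [st.2]))

-- ===== PRECONDITION & SPEC =====
-- Pre_parse excludes only the empty string, on which A raises IndexError (text[0]).
def Pre_parse (text : String) : Prop := text ≠ ""
instance (text : String) : Decidable (Pre_parse text) := by unfold Pre_parse; infer_instance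
def pvWitness_parse : String := "theFlix Page"

def Spec_parse (text : String) (out : String) : Prop := out = parse_alt text
instance (text : String) (out : String) : Decidable (Spec_parse text out) := by unfold Spec_parse; infer_instance

-- ===== CLAIM (what is proved, stated in full; the proofs are below) =====
def Claim_equal_parse : Prop := ∀ (text : String), Dom_parse text → Pre_parse text → Spec_parse text (parse text)

-- ===== LEMMAS AND PROOFS =====

-- replace with the single-char pattern " " is a character map
def swapSp (c : Char) : Char := if c = ' ' then '-' else c

lemma go_single (l : List Char) : ∀ (acc : List Char) (fuel : Nat), l.length ≤ fuel →
    PySem.Chars.replace.go [' '] ['-'] fuel l acc = acc.reverse ++ l.map swapSp := by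
  induction l with
  | nil =>
    intro acc fuel _
    cases fuel <;> simp [PySem.Chars.replace.go]
  | cons c t ih =>
    intro acc fuel hf
    cases fuel with
    | zero => simp at hf
    | succ f =>
      by_cases hc : c = ' '
      · subst hc
        simp [PySem.Chars.replace.go, List.isPrefixOf, ih ('-' :: acc) f (by simpa using hf), swapSp]
      · simp [PySem.Chars.replace.go, List.isPrefixOf, hc, Ne.symm hc,
          ih (c :: acc) f (by simpa using hf), swapSp]

lemma replace_single (cs : List Char) :
    PySem.Chars.replace cs [' '] ['-'] = cs.map swapSp := by
  simpa [PySem.Chars.replace] using go_single cs [] cs.length le_rfl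

lemma join_snoc (s x : List Char) : ∀ (L : List (List Char)), L ≠ [] →
    PySem.Chars.join s (L ++ [x]) = PySem.Chars.join s L ++ s ++ x := by
  intro L
  induction L with
  | nil => intro h; exact absurd rfl h
  | cons a L ih =>
    intro _
    cases L with
    | nil => simp [PySem.Chars.join_singleton, PySem.Chars.join_cons_cons]
    | cons b L' =>
      have ih' := ih (by simp)
      simp only [List.cons_append] at ih' ⊢
      rw [PySem.Chars.join_cons_cons, ih', PySem.Chars.join_cons_cons]
      simp

lemma join_snoc_ext (s x y : List Char) (L : List (List Char)) :
    PySem.Chars.join s (L ++ [x ++ y]) = PySem.Chars.join s (L ++ [x]) ++ y := by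
  cases L with
  | nil => simp [PySem.Chars.join_singleton]
  | cons a L' =>
    rw [join_snoc s (x ++ y) _ (by simp), join_snoc s x _ (by simp)]
    simp

lemma join_map_swap : ∀ (parts : List (List Char)),
    (PySem.Chars.join [' '] parts).map swapSp
      = PySem.Chars.join ['-'] (parts.map (List.map swapSp)) := by
  intro parts
  induction parts with
  | nil => simp [PySem.Chars.join_nil]
  | cons a L ih =>
    cases L with
    | nil => simp [PySem.Chars.join_singleton]
    | cons b L' =>
      simp only [List.map_cons] at ih ⊢
      rw [PySem.Chars.join_cons_cons, PySem.Chars.join_cons_cons]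
      simp [ih, swapSp]

lemma map_swap_id (w : List Char) (h : ' ' ∉ w) : w.map swapSp = w := by
  induction w with
  | nil => rfl
  | cons c t ih =>
    simp only [List.mem_cons, not_or] at h
    simp [swapSp, Ne.symm h.1, ih h.2]

lemma lowerChar_ne_space (c : Char) (h : c ≠ ' ') : PySem.Chars.lowerChar c ≠ ' ' := by
  unfold PySem.Chars.lowerChar
  split
  · rename_i hu
    unfold PySem.Chars.isupper at hu
    simp only [Bool.and_eq_true, decide_eq_true_eq] at hu
    have h1 : 65 ≤ c.toNat := by
      have h' := hu.1; simp [Char.le_def] at h'; exact h'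
    have h2 : c.toNat ≤ 90 := by
      have h' := hu.2; simp [Char.le_def] at h'; exact h'
    intro he
    have ht := congrArg Char.toNat he
    rw [Char.toNat_ofNat] at ht
    rw [if_pos (Or.inl (by omega : c.toNat + 32 < 0xd800))] at ht
    have hs : (' ' : Char).toNat = 32 := rfl
    omega
  · exact h

lemma pyGet_neg_one (l : List Char) : PySem.List.pyGet? l (-1) = l.getLast? := by
  cases l with
  | nil => simp [PySem.List.pyGet?, PySem.List.pyIdx?]
  | cons a t => simp [PySem.List.pyGet?, PySem.List.pyIdx?, List.getLast?_eq_getElem?]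

lemma getLast?_join_last (s x : List Char) (L : List (List Char)) (hx : x ≠ []) :
    (PySem.Chars.join s (L ++ [x])).getLast? = x.getLast? := by
  cases L with
  | nil => simp [PySem.Chars.join_singleton]
  | cons a L' =>
    rw [join_snoc s x _ (by simp)]
    cases hg : x.getLast? with
    | none => exact absurd (List.getLast?_eq_none_iff.mp hg) hx
    | some y => simp [List.getLast?_append, hg]

lemma getLast?_join_empty_last (s : List Char) (hs : s ≠ []) (L : List (List Char)) (hL : L ≠ []) :
    (PySem.Chars.join s (L ++ [([] : List Char)])).getLast? = s.getLast? := by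
  rw [join_snoc s [] L hL]
  cases hg : s.getLast? with
  | none => exact absurd (List.getLast?_eq_none_iff.mp hg) hs
  | some y => simp [List.getLast?_append, hg]

-- the main fold correspondence: A's string is the ' '-join of B's state, words stay space-free
lemma fold_corr : ∀ (rest : List Char) (ws : List (List Char)) (cur : List Char),
    (∀ w ∈ ws ++ [cur], ' ' ∉ w) → (ws ≠ [] ∨ cur ≠ []) →
    rest.foldl parseStepA (PySem.Chars.join [' '] (ws ++ [cur]))
      = PySem.Chars.join [' ']
          ((rest.foldl parseStepB (ws, cur)).1 ++ [(rest.foldl parseStepB (ws, cur)).2])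
    ∧ (∀ w ∈ (rest.foldl parseStepB (ws, cur)).1 ++ [(rest.foldl parseStepB (ws, cur)).2], ' ' ∉ w)
    ∧ ((rest.foldl parseStepB (ws, cur)).1 ≠ [] ∨ (rest.foldl parseStepB (ws, cur)).2 ≠ []) := by
  intro rest
  induction rest with
  | nil => intro ws cur h1 h2; exact ⟨rfl, h1, h2⟩
  | cons c t ih =>
    intro ws cur h1 h2
    by_cases hc : c = ' '
    · subst hc
      have hu : PySem.Chars.isupper ' ' = false := by decide
      have hl : PySem.Chars.lowerChar ' ' = ' ' := by decide
      have hA : parseStepA (PySem.Chars.join [' '] (ws ++ [cur])) ' '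
          = PySem.Chars.join [' '] ((ws ++ [cur]) ++ [([] : List Char)]) := by
        rw [join_snoc [' '] [] (ws ++ [cur]) (by simp)]
        simp [parseStepA, hu, hl]
      have hB : parseStepB (ws, cur) ' ' = (ws ++ [cur], []) := by
        simp [parseStepB]
      have h1' : ∀ w ∈ (ws ++ [cur]) ++ [([] : List Char)], ' ' ∉ w := by
        intro w hw
        rcases List.mem_append.1 hw with hmem | hmem
        · exact h1 w hmem
        · simp at hmem; subst hmem; exact List.not_mem_nil
      simp only [List.foldl_cons, hA, hB]
      exact ih (ws ++ [cur]) [] h1' (Or.inl (by simp))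
    · by_cases hup : PySem.Chars.isupper c = true
      · by_cases hcur : cur = []
        · -- uppercase after a space: appended to the (empty) current word
          have hws : ws ≠ [] := by
            rcases h2 with hh | hh
            · exact hh
            · exact absurd hcur hh
          have hlast : (PySem.Chars.join [' '] (ws ++ [cur])).getLast? = some ' ' := by
            subst hcur
            simpa using getLast?_join_empty_last [' '] (by simp) ws hws
          have hA : parseStepA (PySem.Chars.join [' '] (ws ++ [cur])) c
              = PySem.Chars.join [' '] (ws ++ [cur ++ [PySem.Chars.lowerChar c]]) := by
            rw [join_snoc_ext]
            simp [parseStepA, hup, pyGet_neg_one, hlast]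
          have hB : parseStepB (ws, cur) c = (ws, cur ++ [PySem.Chars.lowerChar c]) := by
            simp [parseStepB, hc, hcur]
          have h1' : ∀ w ∈ ws ++ [cur ++ [PySem.Chars.lowerChar c]], ' ' ∉ w := by
            intro w hw
            rcases List.mem_append.1 hw with hmem | hmem
            · exact h1 w (by simp [hmem])
            · simp at hmem; subst hmem
              intro hm
              rcases List.mem_append.1 hm with hm | hm
              · exact h1 cur (by simp) hm
              · simp at hm; exact lowerChar_ne_space c hc hm.symm
          simp only [List.foldl_cons, hA, hB]
          exact ih ws (cur ++ [PySem.Chars.lowerChar c]) h1' (Or.inr (by simp))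
        · -- uppercase with a nonempty current word: a new word starts
          have hlast : (PySem.Chars.join [' '] (ws ++ [cur])).getLast? ≠ some ' ' := by
            rw [getLast?_join_last _ _ _ hcur]
            have hcsp := h1 cur (by simp)
            cases hg : cur.getLast? with
            | none => simp
            | some d =>
              have hdm : d ∈ cur := List.mem_of_getLast? hg
              intro hd
              injection hd with hd'
              subst hd'
              exact hcsp hdm
          have hA : parseStepA (PySem.Chars.join [' '] (ws ++ [cur])) c
              = PySem.Chars.join [' '] ((ws ++ [cur]) ++ [[PySem.Chars.lowerChar c]]) := by
            rw [join_snoc [' '] [PySem.Chars.lowerChar c] (ws ++ [cur]) (by simp)]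
            simp [parseStepA, hup, pyGet_neg_one, hlast]
          have hB : parseStepB (ws, cur) c = (ws ++ [cur], [PySem.Chars.lowerChar c]) := by
            simp [parseStepB, hc, hup, hcur]
          have h1' : ∀ w ∈ (ws ++ [cur]) ++ [[PySem.Chars.lowerChar c]], ' ' ∉ w := by
            intro w hw
            rcases List.mem_append.1 hw with hmem | hmem
            · exact h1 w hmem
            · simp at hmem; subst hmem
              simp only [List.mem_singleton]
              exact fun hmm => lowerChar_ne_space c hc hmm.symm
          simp only [List.foldl_cons, hA, hB]
          exact ih (ws ++ [cur]) [PySem.Chars.lowerChar c] h1' (Or.inl (by simp))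
      · -- lowercase (or non-letter) non-space: appended to the current word
        have hup' : PySem.Chars.isupper c = false := by simpa using hup
        have hA : parseStepA (PySem.Chars.join [' '] (ws ++ [cur])) c
            = PySem.Chars.join [' '] (ws ++ [cur ++ [PySem.Chars.lowerChar c]]) := by
          rw [join_snoc_ext]
          simp [parseStepA, hup']
        have hB : parseStepB (ws, cur) c = (ws, cur ++ [PySem.Chars.lowerChar c]) := by
          simp [parseStepB, hc, hup']
        have h1' : ∀ w ∈ ws ++ [cur ++ [PySem.Chars.lowerChar c]], ' ' ∉ w := by
          intro w hw
          rcases List.mem_append.1 hw with hmem | hmem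
          · exact h1 w (by simp [hmem])
          · simp at hmem; subst hmem
            intro hm
            rcases List.mem_append.1 hm with hm | hm
            · exact h1 cur (by simp) hm
            · simp at hm; exact lowerChar_ne_space c hc hm.symm
        simp only [List.foldl_cons, hA, hB]
        exact ih ws (cur ++ [PySem.Chars.lowerChar c]) h1' (Or.inr (by simp))

-- ===== VERDICT (by name: the statement is the Claim_ definition above) =====
theorem parse_spec : Claim_equal_parse := by
  intro text _ hpre
  unfold Spec_parse parse parse_alt
  cases htl : text.toList with
  | nil =>
    have hempty : text = "" := by cases text; simp_all
    exact absurd hempty hpre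
  | cons c rest =>
    by_cases hc : c = ' '
    · subst hc
      have hl : PySem.Chars.lowerChar ' ' = ' ' := by decide
      have hB0 : parseStepB ([], []) ' ' = ([[]], []) := by simp [parseStepB]
      simp only [List.foldl_cons, hB0, hl]
      obtain ⟨heq, hns, -⟩ := fold_corr rest [[]] []
        (by intro w hw; simp at hw; simp [hw]) (Or.inl (by simp))
      have hj : PySem.Chars.join [' '] ([[]] ++ [([] : List Char)]) = [' '] := by
        simp [PySem.Chars.join_cons_cons, PySem.Chars.join_singleton]
      rw [hj] at heq
      rw [heq, replace_single, join_map_swap]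
      congr 1
      congr 1
      conv_rhs => rw [← List.map_id ((List.foldl parseStepB ([[]], []) rest).1
        ++ [(List.foldl parseStepB ([[]], []) rest).2])]
      exact List.map_congr_left (fun w hw => map_swap_id w (hns w hw))
    · have hB0 : parseStepB ([], []) c = ([], [PySem.Chars.lowerChar c]) := by
        simp [parseStepB, hc]
      simp only [List.foldl_cons, hB0]
      obtain ⟨heq, hns, -⟩ := fold_corr rest [] [PySem.Chars.lowerChar c]
        (by intro w hw; simp at hw; subst hw
            intro hm; simp at hm; exact lowerChar_ne_space c hc hm.symm)
        (Or.inr (by simp))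
      have hj : PySem.Chars.join [' '] ([] ++ [[PySem.Chars.lowerChar c]])
          = [PySem.Chars.lowerChar c] := by
        simp [PySem.Chars.join_singleton]
      rw [hj] at heq
      rw [heq, replace_single, join_map_swap]
      congr 1
      congr 1
      conv_rhs => rw [← List.map_id ((List.foldl parseStepB ([], [PySem.Chars.lowerChar c]) rest).1
        ++ [(List.foldl parseStepB ([], [PySem.Chars.lowerChar c]) rest).2])]
      exact List.map_congr_left (fun w hw => map_swap_id w (hns w hw))
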